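-- pv_equiv track=rewrite | github.com/Natalia-Parco/desafio-latam-projects | 0_Introduction_to_programming_with_python/0_Challenge_design_lettering/letra_x.py | letra_x
-- ===== SOURCE A (Python) =====
-- def letra_x(n):
--     contain = ""
--     j = 1
--     # En caso de que sea par:
--     if n % 2 == 0:
--         for i in range(n + 1):
--             if i < (n/2):
--                 contain += " " * i + "*" + " " * (n-j) + "*" + "\n"
--             elif i == (n/2):
--                 contain += " " * i + "*" + "\n"
--             else:
--                 contain += " " * (n-i) + "*" + " " * (j-n-2) + "*" + "\n"
--             j += 2
--         return contain
--     # En caso de que sea impar: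
--     else:
--         for i in range(n):
--             if i < (n/2):
--                 contain += " " * i + "*" + " " * (n-j) + "*" + "\n"
--             else:
--                 contain += " " * (n-(i+1)) + "*" + " " * (j-n) + "*" + "\n"
--             j += 2
--         return contain
-- ===== SOURCE B (Python) =====
-- def letra_x(n):
--     if n < 0:
--         return ""
--     half = n // 2
--     top = [" " * i + "*" + " " * (n - 2 * i - 1) + "*" for i in range(half)]
--     center = " " * half + ("*" if n % 2 == 0 else "**")
--     return "\n".join(top + [center] + top[::-1]) + "\n"
-- ===== Notes on version B (the rewrite author's own statement) =====
-- stated objective: simpler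
-- what changed: B computes only the top half of the X as a list of lines and mirrors it around the center line with one join, replacing A's full-height loop over every row with its parity branches and running j accumulator.
import Mathlib
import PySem

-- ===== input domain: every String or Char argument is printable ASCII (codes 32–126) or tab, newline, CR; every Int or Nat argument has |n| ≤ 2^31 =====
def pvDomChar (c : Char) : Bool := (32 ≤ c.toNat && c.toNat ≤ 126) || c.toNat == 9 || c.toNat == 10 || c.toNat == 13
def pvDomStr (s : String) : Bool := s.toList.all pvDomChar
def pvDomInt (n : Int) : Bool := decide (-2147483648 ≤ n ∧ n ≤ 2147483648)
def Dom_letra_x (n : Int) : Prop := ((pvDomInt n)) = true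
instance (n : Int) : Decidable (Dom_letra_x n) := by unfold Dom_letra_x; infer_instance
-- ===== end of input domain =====

-- B builds only the top half of the X as a list of lines and mirrors it around the
-- center line, joining once, instead of A's full-height loop with the running `j`
-- accumulator and per-branch string concatenation (objective: simpler).

-- ===== PORT A =====
-- " " * k  (Python: empty for k ≤ 0)
def spA (k : Int) : List Char := PySem.List.pyRepeat [' '] k

-- Python compares `i < n/2` / `i == n/2` with FLOAT division; for the integers
-- involved this is exactly `2*i < n` / `2*i == n` (n/2 is exactly representable
-- for |n| ≤ 2^31), which is how those tests are written here.
def letra_x (n : Int) : String :=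
  if PySem.Int.mod n 2 == 0 then
    String.ofList (((PySem.List.pyRange 0 (n + 1) 1).foldl
      (fun (st : List Char × Int) i =>
        if 2 * i < n then
          (st.1 ++ spA i ++ ['*'] ++ spA (n - st.2) ++ ['*'] ++ ['\n'], st.2 + 2)
        else if 2 * i == n then
          (st.1 ++ spA i ++ ['*'] ++ ['\n'], st.2 + 2)
        else
          (st.1 ++ spA (n - i) ++ ['*'] ++ spA (st.2 - n - 2) ++ ['*'] ++ ['\n'], st.2 + 2))
      ([], 1)).1)
  else
    String.ofList (((PySem.List.pyRange 0 n 1).foldl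
      (fun (st : List Char × Int) i =>
        if 2 * i < n then
          (st.1 ++ spA i ++ ['*'] ++ spA (n - st.2) ++ ['*'] ++ ['\n'], st.2 + 2)
        else
          (st.1 ++ spA (n - (i + 1)) ++ ['*'] ++ spA (st.2 - n) ++ ['*'] ++ ['\n'], st.2 + 2))
      ([], 1)).1)

-- ===== PORT B =====
def letra_x_alt (n : Int) : String :=
  if n < 0 then ""
  else
    let half := PySem.Int.floordiv n 2
    let top := (PySem.List.pyRange 0 half 1).map (fun i =>
      spA i ++ ['*'] ++ spA (n - 2 * i - 1) ++ ['*'])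
    let center := spA half ++ (if PySem.Int.mod n 2 == 0 then ['*'] else ['*', '*'])
    String.ofList (PySem.Chars.join ['\n'] (top ++ [center] ++ top.reverse) ++ ['\n'])

-- ===== PRECONDITION & SPEC =====
def Spec_letra_x (n : Int) (out : String) : Prop := out = letra_x_alt n
instance (n : Int) (out : String) : Decidable (Spec_letra_x n out) := by unfold Spec_letra_x; infer_instance

-- ===== CLAIM (what is proved, stated in full; the proofs are below) =====
def Claim_equal_letra_x : Prop := ∀ (n : Int), Dom_letra_x n → Spec_letra_x n (letra_x n)

-- ===== LEMMAS AND PROOFS =====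

-- A's even-branch row at index i, with the invariant j = 2*i + 1 substituted.
def rowE (n : Int) (i : Nat) : List Char :=
  if 2 * (i : Int) < n then
    spA i ++ ['*'] ++ spA (n - (2 * (i : Int) + 1)) ++ ['*'] ++ ['\n']
  else if 2 * (i : Int) == n then
    spA i ++ ['*'] ++ ['\n']
  else
    spA (n - i) ++ ['*'] ++ spA ((2 * (i : Int) + 1) - n - 2) ++ ['*'] ++ ['\n']

-- A's odd-branch row at index i, with j = 2*i + 1 substituted.
def rowO (n : Int) (i : Nat) : List Char :=
  if 2 * (i : Int) < n then
    spA i ++ ['*'] ++ spA (n - (2 * (i : Int) + 1)) ++ ['*'] ++ ['\n']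
  else
    spA (n - ((i : Int) + 1)) ++ ['*'] ++ spA ((2 * (i : Int) + 1) - n) ++ ['*'] ++ ['\n']

theorem foldE_eq (n : Int) (k : Nat) :
    (PySem.List.pyRange 0 (k : Int) 1).foldl
      (fun (st : List Char × Int) i =>
        if 2 * i < n then
          (st.1 ++ spA i ++ ['*'] ++ spA (n - st.2) ++ ['*'] ++ ['\n'], st.2 + 2)
        else if 2 * i == n then
          (st.1 ++ spA i ++ ['*'] ++ ['\n'], st.2 + 2)
        else
          (st.1 ++ spA (n - i) ++ ['*'] ++ spA (st.2 - n - 2) ++ ['*'] ++ ['\n'], st.2 + 2))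
      ([], 1)
    = ((List.range k).flatMap (rowE n), 2 * (k : Int) + 1) := by
  induction k with
  | zero => simp [PySem.List.pyRange]
  | succ k ih =>
    have h : ((k : Int) + 1) = ((k + 1 : Nat) : Int) := by push_cast; ring
    rw [← h, PySem.List.pyRange_one_succ_right (by positivity), List.foldl_append, ih,
      List.range_succ]
    simp only [List.foldl_cons, List.foldl_nil, List.flatMap_append, List.flatMap_cons,
      List.flatMap_nil, List.append_nil, rowE]
    split_ifs with h1 h2 <;> simp <;> ring_nf

theorem foldO_eq (n : Int) (k : Nat) :
    (PySem.List.pyRange 0 (k : Int) 1).foldl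
      (fun (st : List Char × Int) i =>
        if 2 * i < n then
          (st.1 ++ spA i ++ ['*'] ++ spA (n - st.2) ++ ['*'] ++ ['\n'], st.2 + 2)
        else
          (st.1 ++ spA (n - (i + 1)) ++ ['*'] ++ spA (st.2 - n) ++ ['*'] ++ ['\n'], st.2 + 2))
      ([], 1)
    = ((List.range k).flatMap (rowO n), 2 * (k : Int) + 1) := by
  induction k with
  | zero => simp
  | succ k ih =>
    have h : ((k : Int) + 1) = ((k + 1 : Nat) : Int) := by push_cast; ring
    rw [← h, PySem.List.pyRange_one_succ_right (by positivity), List.foldl_append, ih,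
      List.range_succ]
    simp only [List.foldl_cons, List.foldl_nil, List.flatMap_append, List.flatMap_cons,
      List.flatMap_nil, List.append_nil, rowO]
    split_ifs with h1 <;> simp <;> ring_nf

theorem spA_eq (k : Int) : spA k = List.replicate k.toNat ' ' :=
  PySem.List.pyRepeat_singleton ' ' k

-- B's top-half row at index i (the Lean-side view of Source B's comprehension body).
def topR (n : Int) (i : Nat) : List Char :=
  spA (i : Int) ++ ['*'] ++ spA (n - 2 * (i : Int) - 1) ++ ['*']

theorem join_newline (l : List (List Char)) (h : l ≠ []) :
    PySem.Chars.join ['\n'] l ++ ['\n'] = l.flatMap (fun r => r ++ ['\n']) := by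
  induction l with
  | nil => exact absurd rfl h
  | cons x t ih =>
    cases t with
    | nil => simp [PySem.Chars.join_singleton]
    | cons y t' =>
      rw [PySem.Chars.join_cons_cons]
      simp only [List.flatMap_cons, List.append_assoc]
      rw [ih (by simp)]
      simp

theorem range_mirror (h : Nat) :
    List.range (2 * h + 1)
      = List.range h ++ [h] ++ (List.range h).map (fun k => h + 1 + k) := by
  have e : 2 * h + 1 = (h + 1) + h := by omega
  rw [e, List.range_add, List.range_succ, List.append_assoc]

theorem reverse_range (h : Nat) :
    (List.range h).reverse = (List.range h).map (fun i => h - 1 - i) := by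
  rw [List.range_eq_range', List.reverse_range']
  simp
  rw [← List.range_eq_range']

theorem rep_row (x y x' y' : Int) (hx : x.toNat = x'.toNat) (hy : y.toNat = y'.toNat)
    (tail : List Char) :
    List.replicate x.toNat ' ' ++ (['*'] ++ (List.replicate y.toNat ' ' ++ tail))
      = List.replicate x'.toNat ' ' ++ (['*'] ++ (List.replicate y'.toNat ' ' ++ tail)) := by
  rw [hx, hy]

theorem rowsE (h : Nat) :
    (List.range (2 * h + 1)).map (rowE ((2 * h : Nat) : Int))
      = ((List.range h).map (topR ((2 * h : Nat) : Int)) ++ [spA ((h : Nat) : Int) ++ ['*']]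
          ++ ((List.range h).map (topR ((2 * h : Nat) : Int))).reverse).map
          (fun r => r ++ ['\n']) := by
  rw [range_mirror, ← List.map_reverse, reverse_range]
  simp only [List.map_append, List.map_map, List.map_cons, List.map_nil]
  congr 1
  congr 1
  · -- top rows
    apply List.map_congr_left
    intro i hi
    rw [List.mem_range] at hi
    simp only [Function.comp_apply]
    rw [rowE, if_pos (by push_cast; omega)]
    simp only [topR, spA_eq, List.append_assoc]
    exact rep_row _ _ _ _ (by omega) (by omega) _
  · -- center row
    congr 1
    rw [rowE, if_neg (by push_cast; omega),
      if_pos (show (2 * ((h : Nat) : Int) == ((2 * h : Nat) : Int)) = true by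
        simp only [beq_iff_eq]; push_cast; ring)]
  · -- bottom rows
    apply List.map_congr_left
    intro k hk
    rw [List.mem_range] at hk
    simp only [Function.comp_apply]
    rw [rowE, if_neg (by push_cast; omega),
      if_neg (show ¬ (2 * ((h + 1 + k : Nat) : Int) == ((2 * h : Nat) : Int)) = true by
        simp only [beq_iff_eq]; push_cast; omega)]
    simp only [topR, spA_eq, List.append_assoc]
    exact rep_row _ _ _ _ (by omega) (by omega) _

theorem rowsO (h : Nat) :
    (List.range (2 * h + 1)).map (rowO ((2 * h + 1 : Nat) : Int))
      = ((List.range h).map (topR ((2 * h + 1 : Nat) : Int)) ++ [spA ((h : Nat) : Int) ++ ['*', '*']]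
          ++ ((List.range h).map (topR ((2 * h + 1 : Nat) : Int))).reverse).map
          (fun r => r ++ ['\n']) := by
  rw [range_mirror, ← List.map_reverse, reverse_range]
  simp only [List.map_append, List.map_map, List.map_cons, List.map_nil]
  congr 1
  congr 1
  · -- top rows
    apply List.map_congr_left
    intro i hi
    rw [List.mem_range] at hi
    simp only [Function.comp_apply]
    rw [rowO, if_pos (by push_cast; omega)]
    simp only [topR, spA_eq, List.append_assoc]
    exact rep_row _ _ _ _ (by omega) (by omega) _
  · -- center row
    congr 1
    rw [rowO, if_pos (by push_cast; omega)]
    simp only [spA_eq, List.append_assoc]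
    have e1 : (((2 * h + 1 : Nat) : Int) - (2 * (h : Int) + 1)).toNat = 0 := by omega
    simp
  · -- bottom rows
    apply List.map_congr_left
    intro k hk
    rw [List.mem_range] at hk
    simp only [Function.comp_apply]
    rw [rowO, if_neg (by push_cast; omega)]
    simp only [topR, spA_eq, List.append_assoc]
    exact rep_row _ _ _ _ (by omega) (by omega) _

theorem letra_x_spec : Claim_equal_letra_x := by
  intro n _
  unfold Spec_letra_x
  rcases lt_or_ge n 0 with hneg | hpos
  · have hA : ∀ b : Int, b ≤ 0 → PySem.List.pyRange 0 b 1 = [] := by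
      intro b hb
      rw [PySem.List.pyRange_one]
      have e : (b - 0).toNat = 0 := by omega
      rw [e]
      simp
    unfold letra_x letra_x_alt
    rw [if_pos hneg]
    split
    · rw [hA (n + 1) (by omega)]
      rfl
    · rw [hA n (by omega)]
      rfl
  · obtain ⟨m, rfl⟩ : ∃ m : Nat, n = (m : Int) := ⟨n.toNat, by omega⟩
    have hmod : PySem.Int.mod (m : Int) 2 = ((m % 2 : Nat) : Int) := by
      exact_mod_cast PySem.Int.mod_natCast m 2
    have hdiv : PySem.Int.floordiv (m : Int) 2 = ((m / 2 : Nat) : Int) := by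
      exact_mod_cast PySem.Int.floordiv_natCast m 2
    rcases Nat.even_or_odd m with ⟨h, hm⟩ | ⟨h, hm⟩
    · -- even: m = 2 * h
      have hm2 : m = 2 * h := by omega
      subst hm2
      have hc : (PySem.Int.mod ((2 * h : Nat) : Int) 2 == 0) = true := by
        rw [hmod]
        have e : (2 * h) % 2 = 0 := by omega
        rw [e]
        simp
      have hA : letra_x ((2 * h : Nat) : Int)
          = String.ofList ((List.range (2 * h + 1)).flatMap (rowE ((2 * h : Nat) : Int))) := by
        unfold letra_x
        rw [if_pos hc,
          show ((2 * h : Nat) : Int) + 1 = ((2 * h + 1 : Nat) : Int) from by push_cast; ring,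
          foldE_eq]
      have hB : letra_x_alt ((2 * h : Nat) : Int)
          = String.ofList ((List.range (2 * h + 1)).flatMap (rowE ((2 * h : Nat) : Int))) := by
        unfold letra_x_alt
        rw [if_neg (show ¬ ((2 * h : Nat) : Int) < 0 from by omega)]
        simp only [hdiv, show (2 * h) / 2 = h from by omega, hc,
          PySem.List.pyRange_zero_natCast, List.map_map, if_true]
        rw [join_newline _ (by simp)]
        congr 1
        rw [List.flatMap_def, List.flatMap_def, rowsE h]
        rfl
      rw [hA, hB]
    · -- odd: m = 2 * h + 1
      subst hm
      have hc : (PySem.Int.mod ((2 * h + 1 : Nat) : Int) 2 == 0) = false := by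
        rw [hmod]
        have e : (2 * h + 1) % 2 = 1 := by omega
        rw [e]
        simp
      have hA : letra_x ((2 * h + 1 : Nat) : Int)
          = String.ofList ((List.range (2 * h + 1)).flatMap (rowO ((2 * h + 1 : Nat) : Int))) := by
        unfold letra_x
        simp only [hc, Bool.false_eq_true, if_false]
        rw [foldO_eq]
      have hB : letra_x_alt ((2 * h + 1 : Nat) : Int)
          = String.ofList ((List.range (2 * h + 1)).flatMap (rowO ((2 * h + 1 : Nat) : Int))) := by
        unfold letra_x_alt
        rw [if_neg (show ¬ ((2 * h + 1 : Nat) : Int) < 0 from by omega)]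
        simp only [hdiv, show (2 * h + 1) / 2 = h from by omega, hc,
          PySem.List.pyRange_zero_natCast, List.map_map, Bool.false_eq_true, if_false]
        rw [join_newline _ (by simp)]
        refine congrArg String.ofList ?_
        rw [List.flatMap_def, List.flatMap_def, rowsO h]
        rfl
      rw [hA, hB]
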